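-- pv_equiv track=rewrite | github.com/oktomarine/okto-dashboard | app.py | parse_market_rates
-- ===== SOURCE A (Python) =====
-- def parse_market_rates(raw):
--     groups = {}
--     current = None
--     skip_next = False
--     for row in raw[1:]:
--         if not any(row): continue
--         label = str(row[0]).strip()
--         if label.startswith("Loading"):
--             current = label
--             groups[current] = []
--             skip_next = True
--         elif skip_next:
--             skip_next = False
--         elif current and label and label != "Discharge":
--             if len(row) >= 5:
--                 groups[current].append({
--                     "discharge": row[0], "c1": row[1],
--                     "c2": row[2], "c3": row[3],
--                     "var": row[4] if len(row) > 4 else "—"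
--                 })
--     return groups
-- ===== SOURCE B (Python) =====
-- def parse_market_rates(raw):
--     # Partition-then-process: split the non-empty rows into labeled segments,
--     # then build each group's list in one comprehension.
--     rows = [r for r in raw[1:] if any(r)]
--     segments = []  # (label, rows-after-header) in encounter order
--     for r in rows:
--         label = str(r[0]).strip()
--         if label.startswith("Loading"):
--             segments.append((label, []))
--         elif segments:
--             segments[-1][1].append(r)
--     groups = {}
--     for label, seg in segments:
--         groups[label] = [
--             {"discharge": r[0], "c1": r[1], "c2": r[2], "c3": r[3], "var": r[4]}
--             for r in seg[1:]  # the first non-empty row after a header is skipped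
--             if str(r[0]).strip() and str(r[0]).strip() != "Discharge" and len(r) >= 5
--         ]
--     return groups
-- ===== Notes on version B (the rewrite author's own statement) =====
-- stated objective: alternative
-- what changed: A's single stateful scan with current/skip_next flags is replaced by a partition-then-process structure: filter out empty rows, split into labeled segments at 'Loading' headers, then build each group's list in one comprehension over seg[1:].
import Mathlib
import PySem

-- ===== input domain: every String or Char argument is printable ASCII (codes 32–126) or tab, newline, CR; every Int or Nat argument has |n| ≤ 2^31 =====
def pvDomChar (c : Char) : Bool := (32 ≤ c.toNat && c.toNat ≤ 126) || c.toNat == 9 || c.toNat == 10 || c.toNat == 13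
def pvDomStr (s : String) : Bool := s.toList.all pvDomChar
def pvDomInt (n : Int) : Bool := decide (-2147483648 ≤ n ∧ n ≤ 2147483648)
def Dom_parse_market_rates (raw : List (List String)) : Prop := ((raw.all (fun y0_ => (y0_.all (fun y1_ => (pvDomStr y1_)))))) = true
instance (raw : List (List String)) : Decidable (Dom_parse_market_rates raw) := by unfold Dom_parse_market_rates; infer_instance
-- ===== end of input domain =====

-- B replaces A's single stateful scan (current/skip_next flags) with a partition-then-process
-- structure: split the non-empty rows into labeled segments, then build each group in one pass
-- per segment (objective: alternative decomposition, same cost).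

-- ===== PORT A =====
-- A's row dict; `row[i]` ported as pyGetD: only evaluated under `len(row) >= 5`, so in range.
def pmrDictA (row : List String) : List (String × String) :=
  [("discharge", PySem.List.pyGetD row 0 ""),
   ("c1", PySem.List.pyGetD row 1 ""),
   ("c2", PySem.List.pyGetD row 2 ""),
   ("c3", PySem.List.pyGetD row 3 ""),
   ("var", if 4 < PySem.List.len row then PySem.List.pyGetD row 4 "" else "—")]

-- the loop body after the `if not any(row): continue` guard
-- (`row[0]` ported as pyGetD row 0 "": only evaluated when any(row) holds, so row ≠ []);
-- state = (groups, current, skip_next); Python's `current and label …` truthiness is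
-- `(st.2.1.getD "") != ""` (None and "" are both falsy).
def pmrBodyA (st : PySem.Dict String (List (List (String × String))) × Option String × Bool)
    (row : List String) : PySem.Dict String (List (List (String × String))) × Option String × Bool :=
  let label := PySem.Str.strip (PySem.List.pyGetD row 0 "")
  if PySem.Str.startswith label "Loading" then
    (st.1.insert label [], some label, true)
  else if st.2.2 then
    (st.1, st.2.1, false)
  else if (st.2.1.getD "") != "" && label != "" && label != "Discharge" then
    if 5 ≤ PySem.List.len row then
      (st.1.modify (st.2.1.getD "") [] (fun v => v ++ [pmrDictA row]), st.2.1, st.2.2)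
    else st
  else st

def pmrStepA (st : PySem.Dict String (List (List (String × String))) × Option String × Bool)
    (row : List String) : PySem.Dict String (List (List (String × String))) × Option String × Bool :=
  if row.any (fun s => s != "") then pmrBodyA st row else st

def parse_market_rates (raw : List (List String)) : List (String × List (List (String × String))) :=
  ((PySem.List.slice raw (some 1) none).foldl pmrStepA (PySem.Dict.empty, none, false)).1.items

-- ===== PORT B =====
-- B's stripped first cell and its two tests, as named helpers
def pmrLabelB (row : List String) : String := PySem.Str.strip (PySem.List.pyGetD row 0 "")

def pmrHdr (row : List String) : Bool := PySem.Str.startswith (pmrLabelB row) "Loading"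

def pmrKeepB (row : List String) : Bool :=
  pmrLabelB row != "" && (pmrLabelB row != "Discharge" && decide (5 ≤ PySem.List.len row))

def pmrDictB (row : List String) : List (String × String) :=
  [("discharge", PySem.List.pyGetD row 0 ""),
   ("c1", PySem.List.pyGetD row 1 ""),
   ("c2", PySem.List.pyGetD row 2 ""),
   ("c3", PySem.List.pyGetD row 3 ""),
   ("var", PySem.List.pyGetD row 4 "")]

-- B mutates segments[-1]; the port keeps the segment list reversed (newest first).
def pmrSegStep (acc : List (String × List (List String))) (row : List String) :
    List (String × List (List String)) :=
  if pmrHdr row then (pmrLabelB row, []) :: acc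
  else
    match acc with
    | [] => []
    | seg :: rest => (seg.1, seg.2 ++ [row]) :: rest

-- the comprehension over seg[1:]
def pmrGroup (seg : List (List String)) : List (List (String × String)) :=
  ((PySem.List.slice seg (some 1) none).filter pmrKeepB).map pmrDictB

def parse_market_rates_alt (raw : List (List String)) : List (String × List (List (String × String))) :=
  let rows := (PySem.List.slice raw (some 1) none).filter (fun r => r.any (fun s => s != ""))
  let segments := (rows.foldl pmrSegStep []).reverse
  (segments.foldl (fun g seg => g.insert seg.1 (pmrGroup seg.2)) PySem.Dict.empty).items

-- ===== PRECONDITION & SPEC =====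
def Spec_parse_market_rates (raw : List (List String)) (out : List (String × List (List (String × String)))) : Prop := out = parse_market_rates_alt raw
instance (raw : List (List String)) (out : List (String × List (List (String × String)))) : Decidable (Spec_parse_market_rates raw out) := by unfold Spec_parse_market_rates; infer_instance

-- ===== CLAIM (what is proved, stated in full; the proofs are below) =====
def Claim_equal_parse_market_rates : Prop := ∀ (raw : List (List String)), Dom_parse_market_rates raw → Spec_parse_market_rates raw (parse_market_rates raw)

-- ===== LEMMAS AND PROOFS =====

-- proof-side view of B: recursive segment splitter and group finisher
def pmrSegs : List (List String) → List (String × List (List String))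
  | [] => []
  | r :: rs =>
    if pmrHdr r then
      (pmrLabelB r, rs.takeWhile (fun x => !pmrHdr x)) :: pmrSegs (rs.dropWhile (fun x => !pmrHdr x))
    else pmrSegs rs
termination_by l => l.length
decreasing_by
· exact Nat.lt_succ_of_le (List.length_dropWhile_le _ rs)
· simp

def pmrFinish (g : PySem.Dict String (List (List (String × String))))
    (ss : List (String × List (List String))) : PySem.Dict String (List (List (String × String))) :=
  ss.foldl (fun g seg => g.insert seg.1 (pmrGroup seg.2)) g

def pmrProc (l : List (List String)) : List (List (String × String)) :=
  (l.filter pmrKeepB).map pmrDictB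

lemma pmrLabel_ne_of_hdr {row : List String} (h : pmrHdr row = true) : pmrLabelB row ≠ "" := by
  intro he; unfold pmrHdr at h; rw [he] at h; exact absurd h (by decide)

lemma pmrGroup_eq_proc_tail (seg : List (List String)) : pmrGroup seg = pmrProc seg.tail := by
  simp [pmrGroup, pmrProc, PySem.List.slice_from_one]

-- case analysis of A's loop body, phrased with B's helpers
lemma pmrBodyA_hdr (g : PySem.Dict String (List (List (String × String)))) (cur : Option String)
    (sk : Bool) (r : List String) (h : pmrHdr r = true) :
    pmrBodyA (g, cur, sk) r = (g.insert (pmrLabelB r) [], some (pmrLabelB r), true) := by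
  unfold pmrBodyA
  dsimp only
  rw [show PySem.Str.strip (PySem.List.pyGetD r 0 "") = pmrLabelB r from rfl]
  rw [show PySem.Str.startswith (pmrLabelB r) "Loading" = pmrHdr r from rfl, h]
  simp

lemma pmrBodyA_skip (g : PySem.Dict String (List (List (String × String)))) (cur : Option String)
    (r : List String) (h : pmrHdr r = false) :
    pmrBodyA (g, cur, true) r = (g, cur, false) := by
  unfold pmrBodyA
  dsimp only
  rw [show PySem.Str.strip (PySem.List.pyGetD r 0 "") = pmrLabelB r from rfl]
  rw [show PySem.Str.startswith (pmrLabelB r) "Loading" = pmrHdr r from rfl, h]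
  simp

lemma pmrBodyA_none (g : PySem.Dict String (List (List (String × String)))) (r : List String)
    (h : pmrHdr r = false) :
    pmrBodyA (g, none, false) r = (g, none, false) := by
  unfold pmrBodyA
  dsimp only
  rw [show PySem.Str.strip (PySem.List.pyGetD r 0 "") = pmrLabelB r from rfl]
  rw [show PySem.Str.startswith (pmrLabelB r) "Loading" = pmrHdr r from rfl, h]
  simp

lemma pmrBodyA_keep (g : PySem.Dict String (List (List (String × String)))) (c : String)
    (r : List String) (hc : c ≠ "") (h : pmrHdr r = false) (hk : pmrKeepB r = true) :
    pmrBodyA (g, some c, false) r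
      = (g.modify c [] (fun v => v ++ [pmrDictA r]), some c, false) := by
  unfold pmrKeepB at hk
  simp only [Bool.and_eq_true, bne_iff_ne, ne_eq, decide_eq_true_eq] at hk
  unfold pmrBodyA
  dsimp only
  rw [show PySem.Str.strip (PySem.List.pyGetD r 0 "") = pmrLabelB r from rfl]
  rw [show PySem.Str.startswith (pmrLabelB r) "Loading" = pmrHdr r from rfl, h]
  rw [if_pos hk.2.2]
  simp [hc, hk.1, hk.2.1]

lemma pmrBodyA_drop (g : PySem.Dict String (List (List (String × String)))) (c : String)
    (r : List String) (h : pmrHdr r = false) (hk : pmrKeepB r = false) :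
    pmrBodyA (g, some c, false) r = (g, some c, false) := by
  unfold pmrKeepB at hk
  unfold pmrBodyA
  dsimp only
  rw [show PySem.Str.strip (PySem.List.pyGetD r 0 "") = pmrLabelB r from rfl]
  rw [show PySem.Str.startswith (pmrLabelB r) "Loading" = pmrHdr r from rfl, h]
  by_cases h1 : pmrLabelB r = ""
  · simp [h1]
  · by_cases h2 : pmrLabelB r = "Discharge"
    · simp [h2]
    · have h3 : ¬ 5 ≤ PySem.List.len r := by
        simp only [Bool.and_eq_false_iff, bne_eq_false_iff_eq, decide_eq_false_iff_not] at hk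
        rcases hk with h' | h' | h'
        · exact absurd h' h1
        · exact absurd h' h2
        · exact h'
      rw [if_neg h3]
      simp

lemma pmrSegs_dropWhile : ∀ l : List (List String),
    pmrSegs (l.dropWhile (fun x => !pmrHdr x)) = pmrSegs l := by
  intro l
  induction l with
  | nil => rfl
  | cons r rs ih =>
    by_cases h : pmrHdr r = true
    · simp [h]
    · simp only [Bool.not_eq_true] at h
      simp [h, pmrSegs, ih]

lemma pmrSegfold : ∀ (l : List (List String)) (lab : String) (seg : List (List String))
    (acc : List (String × List (List String))),
    l.foldl pmrSegStep ((lab, seg) :: acc)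
      = (pmrSegs l).reverse ++ (lab, seg ++ l.takeWhile (fun x => !pmrHdr x)) :: acc := by
  intro l
  induction l with
  | nil => simp [pmrSegs]
  | cons r rs ih =>
    intro lab seg acc
    by_cases h : pmrHdr r = true
    · have hstep : pmrSegStep ((lab, seg) :: acc) r = (pmrLabelB r, []) :: (lab, seg) :: acc := by
        unfold pmrSegStep; simp [h]
      simp only [List.foldl_cons, hstep, ih]
      simp [pmrSegs, h, pmrSegs_dropWhile]
    · have hstep : pmrSegStep ((lab, seg) :: acc) r = (lab, seg ++ [r]) :: acc := by
        unfold pmrSegStep; simp [h]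
      simp only [List.foldl_cons, hstep, ih]
      simp only [Bool.not_eq_true] at h
      simp [pmrSegs, h]

lemma pmrSegfold_nil : ∀ l : List (List String),
    l.foldl pmrSegStep [] = (pmrSegs l).reverse := by
  intro l
  induction l with
  | nil => simp [pmrSegs]
  | cons r rs ih =>
    by_cases h : pmrHdr r = true
    · have hstep : pmrSegStep [] r = [(pmrLabelB r, [])] := by
        unfold pmrSegStep; simp [h]
      simp only [List.foldl_cons, hstep, pmrSegfold]
      simp [pmrSegs, h, pmrSegs_dropWhile]
    · have hstep : pmrSegStep [] r = [] := by
        unfold pmrSegStep; simp [h]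
      simp only [Bool.not_eq_true] at h
      simp only [List.foldl_cons, hstep, ih]
      simp [pmrSegs, h]

lemma pmrInsertModify (d : PySem.Dict String (List (List (String × String)))) (k : String)
    (v : List (List (String × String))) (f : List (List (String × String)) → List (List (String × String))) :
    (d.insert k v).modify k [] f = d.insert k (f v) := by
  simp [PySem.Dict.modify, PySem.Dict.getD_insert_self, PySem.Dict.insert_insert_self]

-- the dicts agree on kept rows (len(row) ≥ 5)
lemma pmrDict_eq {r : List String} (hk : pmrKeepB r = true) : pmrDictA r = pmrDictB r := by
  unfold pmrKeepB at hk
  simp only [Bool.and_eq_true, decide_eq_true_eq] at hk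
  have : 4 < PySem.List.len r := by have := hk.2.2; omega
  unfold pmrDictA pmrDictB
  rw [if_pos this]

-- the joint loop invariant for A's two reachable `current = some c` states
lemma pmrMain : ∀ (l : List (List String)) (g : PySem.Dict String (List (List (String × String)))),
    (∀ (c : String) (w : List (List (String × String))), c ≠ "" →
      (l.foldl pmrBodyA (g.insert c w, some c, false)).1
        = pmrFinish (g.insert c (w ++ pmrProc (l.takeWhile (fun x => !pmrHdr x))))
            (pmrSegs (l.dropWhile (fun x => !pmrHdr x))))
  ∧ (∀ c : String, c ≠ "" →
      (l.foldl pmrBodyA (g.insert c [], some c, true)).1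
        = pmrFinish (g.insert c (pmrProc ((l.takeWhile (fun x => !pmrHdr x)).tail)))
            (pmrSegs (l.dropWhile (fun x => !pmrHdr x)))) := by
  intro l
  induction l with
  | nil =>
    intro g
    constructor
    · intro c w _; simp [pmrFinish, pmrProc, pmrSegs]
    · intro c _; simp [pmrFinish, pmrProc, pmrSegs]
  | cons r rs ih =>
    intro g
    constructor
    · -- skip already consumed: state (g.insert c w, some c, false)
      intro c w hc
      by_cases h : pmrHdr r = true
      · -- header row: open a new segment
        simp only [List.foldl_cons, pmrBodyA_hdr _ _ _ _ h]
        rw [(ih (g.insert c w)).2 (pmrLabelB r) (pmrLabel_ne_of_hdr h)]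
        simp [h, pmrSegs, pmrFinish, pmrProc,
          pmrGroup_eq_proc_tail, pmrSegs_dropWhile]
      · have h' : pmrHdr r = false := by simp only [Bool.not_eq_true] at h; exact h
        by_cases hk : pmrKeepB r = true
        · -- data row that is kept
          simp only [List.foldl_cons, pmrBodyA_keep _ _ _ hc h' hk, pmrInsertModify,
            pmrDict_eq hk]
          rw [(ih g).1 c (w ++ [pmrDictB r]) hc]
          simp [h', pmrProc, hk, List.append_assoc]
        · -- data row that is dropped
          simp only [Bool.not_eq_true] at hk
          simp only [List.foldl_cons, pmrBodyA_drop (g.insert c w) _ _ h' hk]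
          rw [(ih g).1 c w hc]
          simp [h', pmrProc, hk]
    · -- fresh header state: state (g.insert c [], some c, true)
      intro c hc
      by_cases h : pmrHdr r = true
      · simp only [List.foldl_cons, pmrBodyA_hdr _ _ _ _ h]
        rw [(ih (g.insert c [])).2 (pmrLabelB r) (pmrLabel_ne_of_hdr h)]
        simp [h, pmrSegs, pmrFinish, pmrProc,
          pmrGroup_eq_proc_tail, pmrSegs_dropWhile]
      · -- the first non-empty row after a header is consumed by skip_next
        have h' : pmrHdr r = false := by simp only [Bool.not_eq_true] at h; exact h
        simp only [List.foldl_cons, pmrBodyA_skip _ _ _ h']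
        rw [(ih g).1 c [] hc]
        simp [h]

-- before the first header everything is dropped by both sides
lemma pmrNone : ∀ (l : List (List String)) (g : PySem.Dict String (List (List (String × String)))),
    (l.foldl pmrBodyA (g, none, false)).1 = pmrFinish g (pmrSegs l) := by
  intro l
  induction l with
  | nil => intro g; simp [pmrFinish, pmrSegs]
  | cons r rs ih =>
    intro g
    by_cases h : pmrHdr r = true
    · simp only [List.foldl_cons, pmrBodyA_hdr _ _ _ _ h]
      rw [(pmrMain rs g).2 (pmrLabelB r) (pmrLabel_ne_of_hdr h)]
      simp [pmrSegs, h, pmrFinish, pmrGroup_eq_proc_tail, pmrProc]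
    · have h' : pmrHdr r = false := by simp only [Bool.not_eq_true] at h; exact h
      simp only [List.foldl_cons, pmrBodyA_none _ _ h', ih]
      simp only [Bool.not_eq_true] at h
      simp [pmrSegs, h]

-- ===== VERDICT (by name: the statement is the Claim_ definition above) =====
theorem parse_market_rates_spec : Claim_equal_parse_market_rates := by
  intro raw _
  unfold Spec_parse_market_rates parse_market_rates parse_market_rates_alt pmrStepA
  rw [PySem.List.foldl_if_eq_foldl_filter, pmrNone]
  dsimp only
  rw [pmrSegfold_nil, List.reverse_reverse]
  rfl
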